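-- pv_equiv track=rewrite | github.com/pizzasteve111/TareaTDA | greedy.py | submarinos
-- ===== SOURCE A (Python) =====
-- def iluminar(matriz, x, y):
--     n = len(matriz)
--     m = len(matriz[0])
--     for i in range(max(0, x-2), min(n, x+3)):
--         for j in range(max(0, y-2), min(m, y+3)):
--             matriz[i][j] = False
--
-- def contar_submarinos(matriz, x, y):
--     n = len(matriz)
--     m = len(matriz[0])
--     cuenta_submarinos = 0
--     for i in range(max(0, x-2), min(n, x+3)):
--         for j in range(max(0, y-2), min(m, y+3)):
--             if matriz[i][j]:
--                 cuenta_submarinos += 1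
--     return cuenta_submarinos
--
-- def submarinos(matriz):
--
--     n = len(matriz)
--
--     if n == 0:
--         return []
--
--     m = len(matriz[0])
--     faros = []
--
--     while any(any(row) for row in matriz):
--         max_submarinos = 0
--         mejor_posicion = None
--         for i in range(n):
--             for j in range(m):
--                 cuenta_submarinos = contar_submarinos(matriz, i, j)
--                 if cuenta_submarinos > max_submarinos:
--                     max_submarinos = cuenta_submarinos
--                     mejor_posicion = (i, j)
--         if mejor_posicion:
--             x, y = mejor_posicion
--             faros.append((x, y))
--             iluminar(matriz, x, y)
--
--     return faros
-- ===== SOURCE B (Python) =====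
-- def submarinos(matriz):
--     n = len(matriz)
--     if n == 0:
--         return []
--     m = len(matriz[0])
--     faros = []
--     while True:
--         # scatter pass: every submarine adds 1 to each position that could cover it
--         cnt = [[0] * m for _ in range(n)]
--         for r in range(n):
--             for c in range(m):
--                 if matriz[r][c]:
--                     for i in range(max(0, r - 2), min(n, r + 3)):
--                         for j in range(max(0, c - 2), min(m, c + 3)):
--                             cnt[i][j] += 1
--         mejor = None
--         mx = 0
--         for i in range(n):
--             for j in range(m):
--                 if cnt[i][j] > mx:
--                     mx = cnt[i][j]
--                     mejor = (i, j)
--         if mejor is None: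
--             return faros
--         x, y = mejor
--         faros.append(mejor)
--         for i in range(max(0, x - 2), min(n, x + 3)):
--             for j in range(max(0, y - 2), min(m, y + 3)):
--                 matriz[i][j] = False
-- ===== Notes on version B (the rewrite author's own statement) =====
-- stated objective: faster
-- what changed: Instead of recomputing the 5x5-window count for every grid position every round (gather, helper called n*m times per round), B makes one scatter pass per round: each remaining submarine increments the <=25 positions that could cover it in a count table, then a single scan picks the best position; loop termination is read off the table instead of re-scanning the matrix with any().
-- outside the precondition, e.g. on submarinos([[False, False], [False]]): A returns [], B raises IndexError
import Mathlib
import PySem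

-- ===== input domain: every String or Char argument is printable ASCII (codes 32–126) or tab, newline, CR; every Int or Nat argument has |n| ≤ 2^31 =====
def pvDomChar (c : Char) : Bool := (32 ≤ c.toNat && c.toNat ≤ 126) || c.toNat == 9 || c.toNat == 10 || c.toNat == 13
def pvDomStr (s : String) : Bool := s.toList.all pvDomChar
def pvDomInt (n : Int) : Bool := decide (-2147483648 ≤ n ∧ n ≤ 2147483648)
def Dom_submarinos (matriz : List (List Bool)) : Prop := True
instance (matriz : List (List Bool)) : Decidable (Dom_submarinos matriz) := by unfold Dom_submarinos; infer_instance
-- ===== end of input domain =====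

-- B replaces A's per-position window recount (helper contar_submarinos called for every
-- cell, every round) by one scatter pass per round that builds a count table from the
-- remaining submarines, then a single argmax scan; return values agree (both A and B
-- clear the argument matrix in place in Python; the equivalence proved is about the
-- returned list of lighthouses).

-- ===== PORT A =====
-- matriz[i][j] reads/writes: indices here are drawn from ranges starting at max 0 _,
-- so they are nonnegative; pyGetD / List.set at .toNat is exact for them.
def contarA (matriz : List (List Bool)) (x y : Int) : Int :=
  let n : Int := matriz.length
  let m : Int := (matriz.headD []).length
  (PySem.List.pyRange (max 0 (x-2)) (min n (x+3)) 1).foldl (fun acc i =>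
    (PySem.List.pyRange (max 0 (y-2)) (min m (y+3)) 1).foldl (fun acc j =>
      if PySem.List.pyGetD (PySem.List.pyGetD matriz i []) j false then acc + 1 else acc) acc) 0

def iluminarA (matriz : List (List Bool)) (x y : Int) : List (List Bool) :=
  let n : Int := matriz.length
  let m : Int := (matriz.headD []).length
  (PySem.List.pyRange (max 0 (x-2)) (min n (x+3)) 1).foldl (fun mat i =>
    (PySem.List.pyRange (max 0 (y-2)) (min m (y+3)) 1).foldl (fun mat j =>
      mat.set i.toNat ((mat.getD i.toNat []).set j.toNat false)) mat) matriz

-- the body of A's while: scan every position, keep (max_submarinos, mejor_posicion)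
def seleccionA (matriz : List (List Bool)) : Int × Option (Int × Int) :=
  let n : Int := matriz.length
  let m : Int := (matriz.headD []).length
  (PySem.List.pyRange 0 n 1).foldl (fun st i =>
    (PySem.List.pyRange 0 m 1).foldl (fun st j =>
      let c := contarA matriz i j
      if c > st.1 then (c, some (i, j)) else st) st) (0, none)

-- fuel for the while loop: each round clears at least one True, so the number of
-- True cells bounds the number of rounds
def fuelA (matriz : List (List Bool)) : Nat := (matriz.map (fun row => row.count true)).sum

def loopA : Nat → List (List Bool) → List (Int × Int) → List (Int × Int)
  | 0, _, faros => faros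
  | fuel+1, matriz, faros =>
    if matriz.any (fun row => row.any id) then
      match (seleccionA matriz).2 with
      | some (x, y) => loopA fuel (iluminarA matriz x y) (faros ++ [(x, y)])
      | none => loopA fuel matriz faros
    else faros

def submarinos (matriz : List (List Bool)) : List (Int × Int) :=
  if matriz.length = 0 then [] else loopA (fuelA matriz) matriz []

-- ===== PORT B =====
-- scatter pass: every submarine adds 1 to each position that could cover it
def buildCnt (matriz : List (List Bool)) (n m : Int) : List (List Int) :=
  (PySem.List.pyRange 0 n 1).foldl (fun cnt r =>
    (PySem.List.pyRange 0 m 1).foldl (fun cnt c =>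
      if PySem.List.pyGetD (PySem.List.pyGetD matriz r []) c false then
        (PySem.List.pyRange (max 0 (r-2)) (min n (r+3)) 1).foldl (fun cnt i =>
          (PySem.List.pyRange (max 0 (c-2)) (min m (c+3)) 1).foldl (fun cnt j =>
            cnt.set i.toNat ((cnt.getD i.toNat []).set j.toNat
              (((cnt.getD i.toNat []).getD j.toNat 0) + 1))) cnt) cnt
      else cnt) cnt)
    (List.replicate n.toNat (List.replicate m.toNat (0 : Int)))

def seleccionB (cnt : List (List Int)) (n m : Int) : Int × Option (Int × Int) :=
  (PySem.List.pyRange 0 n 1).foldl (fun st i =>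
    (PySem.List.pyRange 0 m 1).foldl (fun st j =>
      if ((cnt.getD i.toNat []).getD j.toNat 0) > st.1 then
        (((cnt.getD i.toNat []).getD j.toNat 0), some (i, j)) else st) st) (0, none)

def clearB (matriz : List (List Bool)) (n m x y : Int) : List (List Bool) :=
  (PySem.List.pyRange (max 0 (x-2)) (min n (x+3)) 1).foldl (fun mat i =>
    (PySem.List.pyRange (max 0 (y-2)) (min m (y+3)) 1).foldl (fun mat j =>
      mat.set i.toNat ((mat.getD i.toNat []).set j.toNat false)) mat) matriz

def fuelB (matriz : List (List Bool)) : Nat := (matriz.map (fun row => row.count true)).sum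

def loopB : Nat → List (List Bool) → Int → Int → List (Int × Int) → List (Int × Int)
  | 0, _, _, _, faros => faros
  | fuel+1, matriz, n, m, faros =>
    let cnt := buildCnt matriz n m
    match (seleccionB cnt n m).2 with
    | none => faros
    | some (x, y) => loopB fuel (clearB matriz n m x y) n m (faros ++ [(x, y)])

def submarinos_alt (matriz : List (List Bool)) : List (Int × Int) :=
  if matriz.length = 0 then [] else
    loopB (fuelB matriz) matriz matriz.length ((matriz.headD []).length) []

-- ===== PRECONDITION & SPEC =====
-- Pre_ excludes matrices with a row shorter than row 0 (A raises IndexError as soon as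
-- any submarine exists, and the natural B raises IndexError even without one) and
-- matrices with a submarine at a column index ≥ len(row 0) (A's scan never counts or
-- clears it, so A loops forever); longer rows padded with False are admitted.
def Pre_submarinos (matriz : List (List Bool)) : Prop :=
  ∀ row ∈ matriz, (matriz.headD []).length ≤ row.length ∧
    (row.drop (matriz.headD []).length).all (fun b => b = false)
instance (matriz : List (List Bool)) : Decidable (Pre_submarinos matriz) := by
  unfold Pre_submarinos; infer_instance

def pvWitness_submarinos : List (List Bool) := [[true, false], [false, true]]

def Spec_submarinos (matriz : List (List Bool)) (out : List (Int × Int)) : Prop := out = submarinos_alt matriz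
instance (matriz : List (List Bool)) (out : List (Int × Int)) : Decidable (Spec_submarinos matriz out) := by unfold Spec_submarinos; infer_instance

-- ===== CLAIM (what is proved, stated in full; the proofs are below) =====
def Claim_equal_submarinos : Prop := ∀ (matriz : List (List Bool)), Dom_submarinos matriz → Pre_submarinos matriz → Spec_submarinos matriz (submarinos matriz)

-- ===== LEMMAS AND PROOFS =====

-- grid cell access (both programs read cells the same way)
def getB (matriz : List (List Bool)) (p : Int × Int) : Bool :=
  PySem.List.pyGetD (PySem.List.pyGetD matriz p.1 []) p.2 false

def getC (cnt : List (List Int)) (p : Int × Int) : Int :=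
  (cnt.getD p.1.toNat []).getD p.2.toNat 0

-- the 5×5 window around (x,y), clipped to the n×m grid, as a flat list
def winList (n m x y : Int) : List (Int × Int) :=
  (PySem.List.pyRange (max 0 (x-2)) (min n (x+3)) 1).flatMap (fun i =>
    (PySem.List.pyRange (max 0 (y-2)) (min m (y+3)) 1).map (fun j => (i, j)))

def gridList (n m : Int) : List (Int × Int) :=
  (PySem.List.pyRange 0 n 1).flatMap (fun i =>
    (PySem.List.pyRange 0 m 1).map (fun j => (i, j)))

def shp (n m : Int) (cnt : List (List Int)) : Prop :=
  cnt.length = n.toNat ∧ ∀ row ∈ cnt, row.length = m.toNat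

-- pair-state step of both selection scans
def selStep (f : Int × Int → Int) (st : Int × Option (Int × Int)) (p : Int × Int) :
    Int × Option (Int × Int) :=
  if f p > st.1 then (f p, some p) else st

def incC (cnt : List (List Int)) (p : Int × Int) : List (List Int) :=
  cnt.set p.1.toNat ((cnt.getD p.1.toNat []).set p.2.toNat
    (((cnt.getD p.1.toNat []).getD p.2.toNat 0) + 1))

def clrStep (mat : List (List Bool)) (p : Int × Int) : List (List Bool) :=
  mat.set p.1.toNat ((mat.getD p.1.toNat []).set p.2.toNat false)

-- matrix shape invariant maintained through the rounds
def SB (n m : Int) (mat : List (List Bool)) : Prop :=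
  mat.length = n.toNat ∧ (mat.headD []).length = m.toNat ∧
    ∀ row ∈ mat, m.toNat ≤ row.length ∧ ∀ k : Nat, m.toNat ≤ k → row.getD k false = false

theorem foldl_flatMap_eq {α β γ : Type} (l : List α) (g : α → List β) (h : γ → β → γ)
    (init : γ) : (l.flatMap g).foldl h init = l.foldl (fun a i => (g i).foldl h a) init := by
  induction l generalizing init with
  | nil => rfl
  | cons x xs ih => simp [List.flatMap_cons, List.foldl_append, ih]

theorem mem_winList_iff (n m x y : Int) (p : Int × Int) :
    p ∈ winList n m x y ↔
      (max 0 (x-2) ≤ p.1 ∧ p.1 < min n (x+3) ∧ max 0 (y-2) ≤ p.2 ∧ p.2 < min m (y+3)) := by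
  constructor
  · intro h
    simp only [winList, List.mem_flatMap, List.mem_map] at h
    obtain ⟨i, hi, j, hj, hp⟩ := h
    rw [PySem.List.mem_pyRange_one] at hi hj
    subst hp; exact ⟨hi.1, hi.2, hj.1, hj.2⟩
  · rintro ⟨h1, h2, h3, h4⟩
    simp only [winList, List.mem_flatMap, List.mem_map]
    exact ⟨p.1, by rw [PySem.List.mem_pyRange_one]; exact ⟨h1, h2⟩,
           p.2, by rw [PySem.List.mem_pyRange_one]; exact ⟨h3, h4⟩, rfl⟩


theorem mem_gridList_iff (n m : Int) (p : Int × Int) :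
    p ∈ gridList n m ↔ (0 ≤ p.1 ∧ p.1 < n ∧ 0 ≤ p.2 ∧ p.2 < m) := by
  constructor
  · intro h
    simp only [gridList, List.mem_flatMap, List.mem_map] at h
    obtain ⟨i, hi, j, hj, hp⟩ := h
    rw [PySem.List.mem_pyRange_one] at hi hj
    subst hp; exact ⟨hi.1, hi.2, hj.1, hj.2⟩
  · rintro ⟨h1, h2, h3, h4⟩
    simp only [gridList, List.mem_flatMap, List.mem_map]
    exact ⟨p.1, by rw [PySem.List.mem_pyRange_one]; exact ⟨h1, h2⟩,
           p.2, by rw [PySem.List.mem_pyRange_one]; exact ⟨h3, h4⟩, rfl⟩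


theorem winList_subset_grid (n m x y : Int) {p : Int × Int} (hp : p ∈ winList n m x y) :
    p ∈ gridList n m := by
  rw [mem_winList_iff] at hp
  rw [mem_gridList_iff]
  omega


theorem mem_winList_symm (n m : Int) {p q : Int × Int} (hp : p ∈ gridList n m)
    (hq : q ∈ gridList n m) : (q ∈ winList n m p.1 p.2) ↔ (p ∈ winList n m q.1 q.2) := by
  rw [mem_gridList_iff] at hp hq
  rw [mem_winList_iff, mem_winList_iff]
  omega


theorem nodup_pairProd {l r : List Int} (hl : l.Nodup) (hr : r.Nodup) :
    (l.flatMap (fun i => r.map (fun j => (i, j)))).Nodup := by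
  induction hl with
  | nil => simp
  | cons hx _ ih =>
    rename_i x l hl'
    simp only [List.flatMap_cons]
    rw [List.nodup_append]
    refine ⟨hr.map (by intro a b h; simpa using h), ih, ?_⟩
    intro p hp1 q hq2
    simp only [List.mem_map] at hp1
    obtain ⟨j, _, rfl⟩ := hp1
    simp only [List.mem_flatMap, List.mem_map] at hq2
    obtain ⟨i, hi, j2, _, rfl⟩ := hq2
    intro hcontra
    exact hx i hi (congrArg Prod.fst hcontra)
theorem nodup_winList (n m x y : Int) : (winList n m x y).Nodup := by
  exact nodup_pairProd (PySem.List.nodup_pyRange_one _ _) (PySem.List.nodup_pyRange_one _ _)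


theorem pyGetD_mem_or {α : Type} (xs : List α) (i : Int) (d : α) :
    PySem.List.pyGetD xs i d = d ∨ PySem.List.pyGetD xs i d ∈ xs := by
  by_cases h : PySem.Raise.InRange xs.length i
  · exact Or.inr (PySem.List.pyGetD_mem xs d h)
  · left
    have hn : PySem.List.pyGet? xs i = none := by
      rw [PySem.List.pyGet?_eq_none_iff]; exact h
    simp [PySem.List.pyGetD, hn]

theorem bump_eq (n m : Int) (r c : Int) (cnt : List (List Int)) :
    (winList n m r c).foldl incC cnt =
      (PySem.List.pyRange (max 0 (r-2)) (min n (r+3)) 1).foldl (fun cnt i =>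
        (PySem.List.pyRange (max 0 (c-2)) (min m (c+3)) 1).foldl (fun cnt j =>
          incC cnt (i, j)) cnt) cnt := by
  rw [winList, foldl_flatMap_eq]
  simp only [List.foldl_map]

-- A's count of a window is a countP over the window list
theorem contarA_eq_countP (mat : List (List Bool)) (x y : Int) :
    contarA mat x y =
      ((winList (mat.length) ((mat.headD []).length) x y).countP (fun p => getB mat p) : Int) := by
  have h : contarA mat x y =
      (winList (mat.length) ((mat.headD []).length) x y).foldl
        (fun acc p => if getB mat p then acc + 1 else acc) 0 := by
    rw [winList, foldl_flatMap_eq]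
    simp only [List.foldl_map]
    rfl
  rw [h, PySem.List.foldl_if_add_one]
  simp


theorem getB_of_no_true (mat : List (List Bool)) (h : mat.any (fun row => row.any id) = false)
    (p : Int × Int) : getB mat p = false := by
  simp only [List.any_eq_false] at h
  rcases pyGetD_mem_or (PySem.List.pyGetD mat p.1 []) p.2 false with hc | hc
  · exact hc
  · rcases pyGetD_mem_or mat p.1 [] with hr | hr
    · rw [hr] at hc; simp at hc
    · have h2 := h _ hr
      simp only [Bool.not_eq_true, List.any_eq_false, id] at h2
      exact h2 _ hc

theorem getC_zeros (n m : Int) (p : Int × Int) :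
    getC (List.replicate n.toNat (List.replicate m.toNat (0 : Int))) p = 0 := by
  simp only [getC, List.getD_eq_getElem?_getD, List.getElem?_replicate]
  split_ifs <;> simp


theorem shp_zeros (n m : Int) : shp n m (List.replicate n.toNat (List.replicate m.toNat (0 : Int))) := by
  constructor
  · simp
  · intro row hrow
    rw [List.eq_of_mem_replicate hrow]
    simp


theorem shp_incC {n m : Int} {cnt : List (List Int)} (h : shp n m cnt) (p : Int × Int) :
    shp n m (incC cnt p) := by
  obtain ⟨h1, h2⟩ := h
  unfold incC
  refine ⟨by simpa using h1, ?_⟩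
  intro row hrow
  by_cases hk : p.1.toNat < cnt.length
  · rcases List.mem_or_eq_of_mem_set hrow with hmem | heq
    · exact h2 row hmem
    · subst heq
      rw [List.length_set, List.getD_eq_getElem cnt [] hk]
      exact h2 _ (List.getElem_mem hk)
  · rw [List.set_eq_of_length_le (by omega)] at hrow
    exact h2 row hrow

theorem getC_incC {n m : Int} {cnt : List (List Int)} (h : shp n m cnt)
    {q : Int × Int} (hq : q ∈ gridList n m) (p : Int × Int) (hp : p ∈ gridList n m) :
    getC (incC cnt q) p = getC cnt p + (if q = p then 1 else 0) := by
  rw [mem_gridList_iff] at hq hp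
  obtain ⟨hq1, hq2, hq3, hq4⟩ := hq
  obtain ⟨hp1, hp2, hp3, hp4⟩ := hp
  obtain ⟨hlen, hrows⟩ := h
  have hqlt : q.1.toNat < cnt.length := by omega
  have hplt : p.1.toNat < cnt.length := by omega
  have hrowq : (cnt.getD q.1.toNat []).length = m.toNat := by
    rw [List.getD_eq_getElem cnt [] hqlt]; exact hrows _ (List.getElem_mem hqlt)
  have hrowp : (cnt.getD p.1.toNat []).length = m.toNat := by
    rw [List.getD_eq_getElem cnt [] hplt]; exact hrows _ (List.getElem_mem hplt)
  have hqp : (q = p) ↔ (q.1.toNat = p.1.toNat ∧ q.2.toNat = p.2.toNat) := by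
    obtain ⟨a, b⟩ := q; obtain ⟨a', b'⟩ := p
    simp only [Prod.mk.injEq]
    omega
  simp only [getC, incC, List.getD_eq_getElem?_getD, List.getElem?_set]
  split_ifs with h1 h2 <;> simp_all

theorem getC_foldl_incC {n m : Int} (P : List (Int × Int)) (hP : ∀ q ∈ P, q ∈ gridList n m)
    {cnt : List (List Int)} (h : shp n m cnt) {p : Int × Int} (hp : p ∈ gridList n m) :
    getC (P.foldl incC cnt) p = getC cnt p + (P.count p : Int) := by
  induction P generalizing cnt with
  | nil => simp
  | cons q P ih =>
    have hq := hP q (by simp)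
    rw [List.foldl_cons, ih (fun x hx => hP x (by simp [hx])) (shp_incC h q),
        getC_incC h hq p hp, List.count_cons]
    by_cases hqp : q = p
    · subst hqp
      simp
      ring
    · rw [if_neg hqp, if_neg (by exact fun hc => hqp (by simp_all))]
      push_cast
      ring


theorem shp_foldl_incC {n m : Int} (P : List (Int × Int)) {cnt : List (List Int)}
    (h : shp n m cnt) : shp n m (P.foldl incC cnt) := by
  induction P generalizing cnt with
  | nil => exact h
  | cons q P ih => exact ih (shp_incC h q)


-- B's scatter pass, rewritten as a fold of window bumps over the submarine cells
theorem buildCnt_eq (mat : List (List Bool)) (n m : Int) :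
    buildCnt mat n m =
      ((gridList n m).filter (fun p => getB mat p)).foldl
        (fun cnt q => (winList n m q.1 q.2).foldl incC cnt)
        (List.replicate n.toNat (List.replicate m.toNat (0 : Int))) := by
  have hgrid : buildCnt mat n m =
      (gridList n m).foldl
        (fun cnt q => if getB mat q then (winList n m q.1 q.2).foldl incC cnt else cnt)
        (List.replicate n.toNat (List.replicate m.toNat (0 : Int))) := by
    rw [gridList, foldl_flatMap_eq]
    simp only [List.foldl_map, bump_eq]
    rfl
  rw [hgrid, PySem.List.foldl_if_eq_foldl_filter]


-- the central fact: the scattered table holds exactly A's gathered window counts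
theorem getC_buildCnt (mat : List (List Bool)) (n m : Int) {p : Int × Int}
    (hp : p ∈ gridList n m) :
    getC (buildCnt mat n m) p = ((winList n m p.1 p.2).countP (fun q => getB mat q) : Int) := by
  have hgridnodup : (gridList n m).Nodup :=
    nodup_pairProd (PySem.List.nodup_pyRange_one _ _) (PySem.List.nodup_pyRange_one _ _)
  rw [buildCnt_eq]
  have key : ∀ (Q : List (Int × Int)), (∀ q ∈ Q, q ∈ gridList n m) →
      ∀ cnt, shp n m cnt →
      getC (Q.foldl (fun cnt q => (winList n m q.1 q.2).foldl incC cnt) cnt) p =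
        getC cnt p + (Q.map (fun q => ((winList n m q.1 q.2).count p : Int))).sum := by
    intro Q
    induction Q with
    | nil => intro _ cnt _; simp
    | cons q Q ih =>
      intro hmem cnt hshp
      rw [List.foldl_cons,
          ih (fun x hx => hmem x (by simp [hx])) _
            (shp_foldl_incC _ hshp),
          getC_foldl_incC _ (fun x hx => winList_subset_grid n m q.1 q.2 hx) hshp hp]
      simp
      ring
  rw [key _ (fun q hq => (List.mem_filter.mp hq).1) _ (shp_zeros n m), getC_zeros]
  have hcnt01 : ∀ (Q : List (Int × Int)),
      (Q.map (fun q => ((winList n m q.1 q.2).count p : Int))).sum =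
        (Q.countP (fun q => decide (p ∈ winList n m q.1 q.2)) : Int) := by
    intro Q
    induction Q with
    | nil => simp
    | cons q Q ih =>
      by_cases hq : p ∈ winList n m q.1 q.2
      · simp [hq, ih, List.count_eq_one_of_mem (nodup_winList n m q.1 q.2) hq]
        ring
      · simp [hq, ih, List.count_eq_zero.mpr hq]
  rw [hcnt01, List.countP_filter]
  have hsymm : ((gridList n m).filter
        (fun q => decide (p ∈ winList n m q.1 q.2) && getB mat q)) =
      ((gridList n m).filter (fun q => decide (q ∈ winList n m p.1 p.2) && getB mat q)) :=
    List.filter_congr (fun q hq => by simp only [← mem_winList_symm n m hp hq])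
  rw [List.countP_eq_length_filter, hsymm]
  have hperm : ((gridList n m).filter
        (fun q => decide (q ∈ winList n m p.1 p.2) && getB mat q)).Perm
      ((winList n m p.1 p.2).filter (fun q => getB mat q)) := by
    apply (List.perm_ext_iff_of_nodup (hgridnodup.filter _)
      ((nodup_winList n m p.1 p.2).filter _)).mpr
    intro x
    simp only [List.mem_filter, Bool.and_eq_true, decide_eq_true_eq]
    constructor
    · rintro ⟨_, hx2, hx3⟩; exact ⟨hx2, hx3⟩
    · rintro ⟨hx1, hx2⟩; exact ⟨winList_subset_grid n m p.1 p.2 hx1, hx1, hx2⟩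
  rw [hperm.length_eq, ← List.countP_eq_length_filter]
  norm_num


theorem sel_stays_some (f : Int × Int → Int) (L : List (Int × Int)) (a : Int) (q : Int × Int) :
    (L.foldl (selStep f) (a, some q)).2 ≠ none := by
  induction L generalizing a q with
  | nil => simp
  | cons x L ih =>
    simp only [List.foldl_cons, selStep]
    split_ifs
    · exact ih _ _
    · exact ih _ _


theorem sel_ne_none (f : Int × Int → Int) {L : List (Int × Int)} {p : Int × Int}
    (hp : p ∈ L) {a : Int} (hf : f p > a) (o : Option (Int × Int)) :
    (L.foldl (selStep f) (a, o)).2 ≠ none := by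
  induction L generalizing a o with
  | nil => simp at hp
  | cons x L ih =>
    simp only [List.foldl_cons, selStep]
    rcases List.mem_cons.mp hp with rfl | hpL
    · rw [if_pos hf]
      exact sel_stays_some f L _ _
    · split_ifs with hx
      · exact sel_stays_some f L _ _
      · exact ih hpL hf o


theorem sel_fixed (f : Int × Int → Int) (L : List (Int × Int)) {a : Int}
    (h : ∀ p ∈ L, f p ≤ a) (o : Option (Int × Int)) :
    L.foldl (selStep f) (a, o) = (a, o) := by
  induction L with
  | nil => rfl
  | cons x L ih =>
    simp only [List.foldl_cons, selStep, if_neg (by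
      have := h x (by simp)
      omega : ¬ f x > a)]
    exact ih (fun q hq => h q (by simp [hq]))


theorem seleccionA_flat (mat : List (List Bool)) :
    seleccionA mat =
      (gridList (mat.length) ((mat.headD []).length)).foldl
        (selStep (fun p => contarA mat p.1 p.2)) (0, none) := by
  rw [gridList, foldl_flatMap_eq]
  simp only [List.foldl_map]
  rfl


theorem seleccionB_flat (cnt : List (List Int)) (n m : Int) :
    seleccionB cnt n m = (gridList n m).foldl (selStep (fun p => getC cnt p)) (0, none) := by
  rw [gridList, foldl_flatMap_eq]
  simp only [List.foldl_map]
  rfl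


theorem iluminarA_eq_clearB (mat : List (List Bool)) (n m x y : Int)
    (hn : (mat.length : Int) = n) (hm : ((mat.headD []).length : Int) = m) :
    iluminarA mat x y = clearB mat n m x y := by
  subst hn
  subst hm
  rfl


theorem clearB_flat (mat : List (List Bool)) (n m x y : Int) :
    clearB mat n m x y = (winList n m x y).foldl clrStep mat := by
  rw [clearB, winList, foldl_flatMap_eq]
  simp only [List.foldl_map]
  rfl


theorem SB_clrStep {n m : Int} {mat : List (List Bool)} (h : SB n m mat)
    (p : Int × Int) : SB n m (clrStep mat p) := by
  obtain ⟨h1, hh, h2⟩ := h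
  unfold clrStep
  refine ⟨by simpa using h1, ?_, ?_⟩
  · cases mat with
    | nil => simpa using hh
    | cons r t =>
      cases hk : p.1.toNat with
      | zero =>
        simp only [hk, List.set_cons_zero, List.headD_cons] at *
        simpa using hh
      | succ k =>
        simpa [hk] using hh
  · intro row hrow
    by_cases hk : p.1.toNat < mat.length
    · rcases List.mem_or_eq_of_mem_set hrow with hmem | heq
      · exact h2 row hmem
      · subst heq
        have hmemold : mat.getD p.1.toNat [] ∈ mat := by
          rw [List.getD_eq_getElem mat [] hk]
          exact List.getElem_mem hk
        have hold := h2 _ hmemold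
        refine ⟨by rw [List.length_set]; exact hold.1, ?_⟩
        intro k hkm
        simp only [List.getD_eq_getElem?_getD, List.getElem?_set]
        split_ifs with hjk hjl
        · simp
        · simp
        · have := hold.2 k hkm
          simpa [List.getD_eq_getElem?_getD] using this
    · rw [List.set_eq_of_length_le (by omega)] at hrow
      exact h2 row hrow

theorem SB_clearB {n m : Int} {mat : List (List Bool)} (h : SB n m mat) (x y : Int) :
    SB n m (clearB mat n m x y) := by
  rw [clearB_flat]
  have : ∀ (P : List (Int × Int)), (∀ q ∈ P, q ∈ gridList n m) →
      ∀ mat', SB n m mat' → SB n m (P.foldl clrStep mat') := by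
    intro P
    induction P with
    | nil => intro _ mat' h'; exact h'
    | cons q P ih =>
      intro hmem mat' h'
      exact ih (fun x hx => hmem x (by simp [hx])) _ (SB_clrStep h' q)
  exact this _ (fun q hq => winList_subset_grid n m x y hq) mat h


-- dimensions read back from a matrix of shape n×m (n ≥ 1)
theorem dims_eq {n m : Int} {mat : List (List Bool)} (h : SB n m mat) (hn : 1 ≤ n)
    (hm : 0 ≤ m) : (mat.length : Int) = n ∧ ((mat.headD []).length : Int) = m := by
  obtain ⟨h1, hh, h2⟩ := h
  constructor <;> omega

-- one round agrees, hence the whole loop agrees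
theorem loop_eq {n m : Int} (hn : 1 ≤ n) (hm : 0 ≤ m) (fuel : Nat) :
    ∀ (mat : List (List Bool)) (faros : List (Int × Int)), SB n m mat →
      loopA fuel mat faros = loopB fuel mat n m faros := by
  induction fuel with
  | zero => intro mat faros _; rfl
  | succ fuel ih =>
    intro mat faros hSB
    obtain ⟨hdn, hdm⟩ := dims_eq hSB hn hm
    by_cases hany : mat.any (fun row => row.any id)
    · -- some submarine is left: both sides pick the same best position
      have hex : ∃ row ∈ mat, row.any id := by simpa using hany
      obtain ⟨row, hrowmem, hrowany⟩ := hex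
      obtain ⟨r, hr, hrowr⟩ := List.mem_iff_getElem.mp hrowmem
      have hexb : ∃ b ∈ row, id b := by simpa using hrowany
      obtain ⟨bb, hbmem, hbb⟩ := hexb
      obtain ⟨c, hc, hrowc⟩ := List.mem_iff_getElem.mp hbmem
      have hrn : r < n.toNat := by rw [← hSB.1]; exact hr
      have hrow2 := hSB.2.2 row hrowmem
      have hcm : c < m.toNat := by
        by_contra hge
        have h0 := hrow2.2 c (by omega)
        rw [List.getD_eq_getElem row false hc, hrowc] at h0
        rw [h0] at hbb
        simp at hbb
      have hp₀grid : ((r : Int), (c : Int)) ∈ gridList n m := by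
        rw [mem_gridList_iff]
        constructor
        · positivity
        refine ⟨by omega, by positivity, by omega⟩
      have hgetB : getB mat ((r : Int), (c : Int)) = true := by
        simp only [getB, PySem.List.pyGetD_natCast]
        rw [List.getD_eq_getElem mat [] hr, hrowr, List.getD_eq_getElem row false hc, hrowc]
        simpa using hbb
      have hwin : ((r : Int), (c : Int)) ∈ winList n m (r : Int) (c : Int) := by
        rw [mem_winList_iff]
        refine ⟨by omega, by omega, by omega, by omega⟩
      have hcpos : contarA mat (r : Int) (c : Int) > 0 := by
        rw [contarA_eq_countP, hdn, hdm]
        have : 0 < (winList n m (r : Int) (c : Int)).countP (fun q => getB mat q) :=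
          List.countP_pos_iff.mpr ⟨_, hwin, hgetB⟩
        exact_mod_cast this
      have hcnteq : ∀ q ∈ gridList n m,
          contarA mat q.1 q.2 = getC (buildCnt mat n m) q := by
        intro q hq
        rw [getC_buildCnt mat n m hq, contarA_eq_countP, hdn, hdm]
      have hseleq : seleccionA mat = seleccionB (buildCnt mat n m) n m := by
        rw [seleccionA_flat, seleccionB_flat, hdn, hdm]
        exact PySem.List.foldl_congr_mem _ _ _ _ (fun st q hq => by
          simp only [selStep, hcnteq q hq])
      have hne : (seleccionA mat).2 ≠ none := by
        rw [seleccionA_flat, hdn, hdm]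
        exact sel_ne_none _ hp₀grid hcpos none
      rcases hsel : (seleccionA mat).2 with _ | ⟨x, y⟩
      · exact absurd hsel hne
      · have hselB : (seleccionB (buildCnt mat n m) n m).2 = some (x, y) := by
          rw [← hseleq]; exact hsel
        simp only [loopA, loopB, hany, if_true, hsel, hselB]
        rw [iluminarA_eq_clearB mat n m x y hdn hdm]
        exact ih _ _ (SB_clearB hSB x y)
    · -- no submarine left: A's while stops, B finds no position with positive count
      have hanyf : mat.any (fun row => row.any id) = false := by simpa using hany
      have hzero : ∀ p ∈ gridList n m, getC (buildCnt mat n m) p ≤ (0 : Int) := by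
        intro p hp
        rw [getC_buildCnt mat n m hp]
        have : (winList n m p.1 p.2).countP (fun q => getB mat q) = 0 :=
          List.countP_eq_zero.mpr (fun q _ => by simp [getB_of_no_true mat hanyf q])
        simp [this]
      have hselB : seleccionB (buildCnt mat n m) n m = (0, none) := by
        rw [seleccionB_flat]
        exact sel_fixed _ _ hzero none
      simp only [loopA, loopB, hanyf, hselB]
      simp


-- ===== VERDICT =====
theorem submarinos_spec : Claim_equal_submarinos := by
  intro mat _ hpre
  unfold Spec_submarinos submarinos submarinos_alt
  by_cases hlen : mat.length = 0
  · simp [hlen]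
  · simp only [hlen, if_false]
    have hSB : SB ((mat.length : Int)) (((mat.headD []).length : Int)) mat := by
      refine ⟨by simp, by simp, ?_⟩
      intro row hrow
      obtain ⟨hge, hdrop⟩ := hpre row hrow
      refine ⟨by simpa using hge, ?_⟩
      intro k hk
      rw [Int.toNat_natCast] at hk
      by_cases hkl : k < row.length
      · rw [List.getD_eq_getElem row false hkl]
        have hsub : k - (mat.headD []).length < (row.drop (mat.headD []).length).length := by
          rw [List.length_drop]
          omega
        have hmem : row[k] ∈ row.drop (mat.headD []).length := by
          have : row[k] = (row.drop (mat.headD []).length)[k - (mat.headD []).length]'hsub := by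
            rw [List.getElem_drop]
            congr 1
            omega
          rw [this]
          exact List.getElem_mem hsub
        have := List.all_eq_true.mp hdrop _ hmem
        simpa using this
      · rw [List.getD_eq_default row false (by omega)]
    exact loop_eq (by exact_mod_cast Nat.one_le_iff_ne_zero.mpr hlen) (by positivity)
      (fuelA mat) mat [] hSB
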